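-- pv_equiv track=rewrite | github.com/wijnen/python-fhs | xdgbasedir.py | protect
-- ===== SOURCE A (Python) =====
-- def protect (data, extra = ''):
-- 	ret = ''
-- 	extra += '%'
-- 	for x in data:
-- 		o = ord (x)
-- 		if o < 32 or o >= 127 or x in extra:
-- 			ret += '%%%02x' % o
-- 		else:
-- 			ret += x
-- 	return ret
-- ===== SOURCE B (Python) =====
-- def protect(data, extra=''):
--     bad = set(extra)
--     bad.add('%')
--     table = {ord(x): '%%%02x' % ord(x) for x in set(data)
--              if ord(x) < 32 or ord(x) >= 127 or x in bad}
--     return data.translate(table)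
-- ===== Notes on version B (the rewrite author's own statement) =====
-- stated objective: idiomatic
-- what changed: Replaces the character-by-character string-concatenation loop with a translation table built once over the distinct characters of data and a single str.translate call.
import Mathlib
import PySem

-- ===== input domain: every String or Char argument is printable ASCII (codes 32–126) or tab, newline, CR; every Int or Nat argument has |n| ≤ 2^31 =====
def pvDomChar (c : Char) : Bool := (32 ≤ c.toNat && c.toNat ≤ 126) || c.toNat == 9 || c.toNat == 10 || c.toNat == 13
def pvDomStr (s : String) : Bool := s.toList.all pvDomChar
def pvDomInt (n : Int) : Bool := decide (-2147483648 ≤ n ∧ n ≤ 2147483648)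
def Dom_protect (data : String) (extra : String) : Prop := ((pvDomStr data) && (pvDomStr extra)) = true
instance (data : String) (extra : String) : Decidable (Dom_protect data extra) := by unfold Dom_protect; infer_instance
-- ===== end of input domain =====

-- B replaces the per-character concatenation loop by a translation table built once
-- over the distinct characters of data, applied with str.translate (objective: idiomatic).

-- '%%%02x' % o — exact for 0 ≤ o < 256 (every character either port feeds it has code < 256)
def pvHexDigit (n : Nat) : Char := if n < 10 then Char.ofNat (48 + n) else Char.ofNat (87 + n)
def pvPct (o : Nat) : List Char := ['%', pvHexDigit (o / 16), pvHexDigit (o % 16)]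

-- ===== PORT A =====
-- strings are carried as List Char; 'x in extra2' for the single character x is list membership
def protect (data : String) (extra : String) : String :=
  let extra2 := extra.toList ++ ['%']
  String.mk (data.toList.foldl (fun ret x =>
    let o := x.toNat
    if o < 32 || 127 ≤ o || extra2.contains x then ret ++ pvPct o else ret ++ [x]) [])

-- ===== PORT B =====
-- table iterates set(data) only to build a Dict that is looked up afterwards (order-independent);
-- str.translate is ported by hand: each character is replaced by its table entry if present — exact.
def protect_alt (data : String) (extra : String) : String :=
  let bad := (PySem.Set.ofList extra.toList).add '%'
  let table := (PySem.Set.ofList data.toList).foldl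
    (fun (t : PySem.Dict Nat (List Char)) x =>
      if x.toNat < 32 || 127 ≤ x.toNat || bad.contains x then
        t.insert x.toNat (pvPct x.toNat)
      else t)
    PySem.Dict.empty
  String.mk (data.toList.flatMap (fun c => (table.get? c.toNat).getD [c]))

-- ===== PRECONDITION & SPEC =====
def Spec_protect (data : String) (extra : String) (out : String) : Prop := out = protect_alt data extra
instance (data : String) (extra : String) (out : String) : Decidable (Spec_protect data extra out) := by unfold Spec_protect; infer_instance

-- ===== CLAIM (what is proved, stated in full; the proofs are below) =====
def Claim_equal_protect : Prop := ∀ (data : String) (extra : String), Dom_protect data extra → Spec_protect data extra (protect data extra)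

-- ===== LEMMAS AND PROOFS =====

theorem pv_toNat_inj {c d : Char} (h : c.toNat = d.toNat) : c = d := by
  apply Char.ext
  exact UInt32.toNat_inj.mp h

-- the table fold, looked up at a character's code
theorem pv_table_get (P : Char → Bool) (L : List Char) (t : PySem.Dict Nat (List Char)) (c : Char) :
    ((L.foldl (fun t x => if P x then t.insert x.toNat (pvPct x.toNat) else t) t).get? c.toNat)
      = if c ∈ L ∧ P c then some (pvPct c.toNat) else t.get? c.toNat := by
  induction L generalizing t with
  | nil => simp
  | cons x L ih =>
    simp only [List.foldl_cons]
    rw [ih]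
    by_cases hm : c ∈ L ∧ P c = true
    · rw [if_pos hm, if_pos ⟨List.mem_cons_of_mem x hm.1, hm.2⟩]
    · rw [if_neg hm]
      by_cases hx : P x = true
      · rw [if_pos hx, PySem.Dict.get?_insert]
        by_cases he : c.toNat = x.toNat
        · have hcx : c = x := pv_toNat_inj he
          subst hcx
          rw [if_pos rfl, if_pos ⟨List.mem_cons_self, hx⟩]
        · rw [if_neg he, if_neg]
          rintro ⟨hc, hp⟩
          rcases List.mem_cons.mp hc with h1 | h1
          · exact he (by rw [h1])
          · exact hm ⟨h1, hp⟩
      · rw [if_neg hx, if_neg]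
        rintro ⟨hc, hp⟩
        rcases List.mem_cons.mp hc with h1 | h1
        · rw [h1] at hp; exact hx hp
        · exact hm ⟨h1, hp⟩

-- B's membership test equals A's
theorem pv_pred_eq (extra : String) (c : Char) :
    (c.toNat < 32 || 127 ≤ c.toNat || ((PySem.Set.ofList extra.toList).add '%').contains c)
      = (c.toNat < 32 || 127 ≤ c.toNat || (extra.toList ++ ['%']).contains c) := by
  have h : ((PySem.Set.ofList extra.toList).add '%').contains c
      = (extra.toList ++ ['%']).contains c := by
    simp [PySem.Set.contains, PySem.Set.mem_add, PySem.Set.mem_ofList]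
  rw [h]

-- A's accumulator loop, written as a flatMap
theorem pv_loopA (extra : String) (L : List Char) (acc : List Char) :
    (L.foldl (fun ret x =>
        if x.toNat < 32 || 127 ≤ x.toNat || (extra.toList ++ ['%']).contains x
        then ret ++ pvPct x.toNat else ret ++ [x]) acc)
      = acc ++ L.flatMap (fun c =>
          if c.toNat < 32 || 127 ≤ c.toNat || (extra.toList ++ ['%']).contains c
          then pvPct c.toNat else [c]) := by
  induction L generalizing acc with
  | nil => simp
  | cons x L ih =>
    simp only [List.foldl_cons, List.flatMap_cons, ih]
    by_cases h : (x.toNat < 32 || 127 ≤ x.toNat || (extra.toList ++ ['%']).contains x) = true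
    · rw [if_pos h, if_pos h, List.append_assoc]
    · rw [if_neg h, if_neg h, List.append_assoc]

-- ===== VERDICT (by name: the statement is the Claim_ definition above) =====
theorem protect_spec : Claim_equal_protect := by
  intro data extra _
  unfold Spec_protect protect protect_alt
  dsimp only []
  congr 1
  rw [pv_loopA, List.nil_append]
  apply List.flatMap_congr
  intro c hc
  rw [pv_table_get]
  have hmem : c ∈ PySem.Set.ofList data.toList := (PySem.Set.mem_ofList _ _).mpr hc
  by_cases hp : (c.toNat < 32 || 127 ≤ c.toNat
      || ((PySem.Set.ofList extra.toList).add '%').contains c) = true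
  · have hq : (c.toNat < 32 || 127 ≤ c.toNat || (extra.toList ++ ['%']).contains c) = true := by
      rw [← pv_pred_eq]; exact hp
    rw [if_pos hq, if_pos (And.intro hmem hp), Option.getD_some]
  · have hq : ¬ (c.toNat < 32 || 127 ≤ c.toNat || (extra.toList ++ ['%']).contains c) = true := by
      rw [← pv_pred_eq]; exact hp
    rw [if_neg hq, if_neg (fun h => hp h.2), PySem.Dict.get?_empty, Option.getD_none]
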